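-- pv_equiv track=rewrite | github.com/wangluyi/assignment-for-edX-course-Introduction-to-Computer-Science-and-Programming-Using-Python | fruit.py | nfruits
-- ===== SOURCE A (Python) =====
-- def nfruits(dict, fruits_eaten):
--     '''
--     a function "nfruits" that takes two arguments:
--
-- * A non-empty dictionary containing type of fruit and its quantity initially with Python when he leaves home (length < 10)
-- * A string pattern of the fruits eaten by Python on his journey as observed by Cobra.
--
-- This function should return the maximum quantity out of the different types of fruits that is available with Python when he has reached the campus.
--     '''
--
--     for item in fruits_eaten[:-1]:
--         for fruit in dict:
--             if fruit==item:
--                 dict[fruit] -= 1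
--             else:
--                 dict[fruit] += 1
--
--     #deal with the last eaten fruit
--     item = fruits_eaten[-1]
--     for fruit in dict:
--         if fruit==item:
--             dict[fruit] -= 1
--
--     #find the maximum of quantity of the fruits left
--     max_fruit = 0
--     for fruit in dict:
--         if dict[fruit] > max_fruit:
--             max_fruit = dict[fruit]
--     return max_fruit
-- ===== SOURCE B (Python) =====
-- def nfruits(dict, fruits_eaten):
--     # Simpler single-pass rewrite: each entry's final value is computed in closed
--     # form (initial + len(body) - 2*count(fruit in body) - 1 if it is the last
--     # eaten fruit), instead of A's per-eaten-character sweep over the dict.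
--     # Mutates dict in place exactly as A does.
--     last = fruits_eaten[-1]
--     body = fruits_eaten[:-1]
--     counts = {}
--     for ch in body:
--         counts[ch] = counts.get(ch, 0) + 1
--     L = len(body)
--     best = 0
--     for fruit in dict:
--         v = dict[fruit] + L - 2 * counts.get(fruit, 0) - (1 if fruit == last else 0)
--         dict[fruit] = v
--         if v > best:
--             best = v
--     return best
-- ===== Notes on version B (the rewrite author's own statement) =====
-- stated objective: faster
-- what changed: B replaces A's nested sweep (for every eaten character, walk the whole dict) by one character-counting pass over fruits_eaten plus one closed-form pass over the dict, fusing the final maximum into that pass.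
import Mathlib
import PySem

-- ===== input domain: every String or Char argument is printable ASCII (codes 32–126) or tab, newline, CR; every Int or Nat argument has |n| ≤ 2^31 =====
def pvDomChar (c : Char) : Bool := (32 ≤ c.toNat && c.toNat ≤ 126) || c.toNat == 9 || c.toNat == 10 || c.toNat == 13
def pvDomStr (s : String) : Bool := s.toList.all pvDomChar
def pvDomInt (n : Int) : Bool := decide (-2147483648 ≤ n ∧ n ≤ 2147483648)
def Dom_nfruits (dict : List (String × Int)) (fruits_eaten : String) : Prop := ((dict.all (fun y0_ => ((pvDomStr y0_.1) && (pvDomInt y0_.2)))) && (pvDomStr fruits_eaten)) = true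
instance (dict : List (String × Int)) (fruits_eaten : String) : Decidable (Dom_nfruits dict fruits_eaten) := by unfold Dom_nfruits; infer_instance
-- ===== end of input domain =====

-- B fuses A's nested per-character sweep of the dict into one counting pass plus one
-- closed-form pass; equivalence is about the RETURN value only (in Python both A and B
-- mutate the dict argument identically in place).

-- ===== PORT A =====
-- 'for fruit in dict: dict[fruit] ± 1' updates every entry's value in insertion order:
-- with the unique keys Pre_ demands this is a map over the association list.
def nfruits (dict : List (String × Int)) (fruits_eaten : String) : Int :=
  -- fruits_eaten[:-1] is exactly toList.dropLast (also for the empty string)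
  let d1 := (fruits_eaten.toList.dropLast).foldl
      (fun d item => d.map (fun p =>
        if p.1 = String.mk [item] then (p.1, p.2 - 1) else (p.1, p.2 + 1))) dict
  match PySem.Str.pyGet? fruits_eaten (-1) with
  | none => 0  -- IndexError in Python; excluded by Pre_
  | some item =>
    let d2 := d1.map (fun p => if p.1 = String.mk [item] then (p.1, p.2 - 1) else p)
    d2.foldl (fun m p => if p.2 > m then p.2 else m) 0

-- ===== PORT B =====
def nfruits_alt (dict : List (String × Int)) (fruits_eaten : String) : Int :=
  match PySem.Str.pyGet? fruits_eaten (-1) with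
  | none => 0  -- IndexError in Python; excluded by Pre_
  | some last =>
    let body := fruits_eaten.toList.dropLast
    let counts : PySem.Dict String Int :=
      body.foldl (fun c ch =>
        c.insert (String.mk [ch]) (c.getD (String.mk [ch]) 0 + 1)) PySem.Dict.empty
    let L : Int := body.length
    dict.foldl (fun best p =>
      let v := p.2 + L - 2 * counts.getD p.1 0 - (if p.1 = String.mk [last] then 1 else 0)
      if v > best then v else best) 0

-- ===== PRECONDITION & SPEC =====
-- Pre_ excludes the empty eating pattern, on which A raises IndexError at fruits_eaten[-1],
-- and association lists with duplicate keys, which do not represent any Python dict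
-- (dict() construction collapses them, so A's behaviour there is representation-dependent).
def Pre_nfruits (dict : List (String × Int)) (fruits_eaten : String) : Prop :=
  fruits_eaten ≠ "" ∧ (dict.map Prod.fst).Nodup
instance (dict : List (String × Int)) (fruits_eaten : String) : Decidable (Pre_nfruits dict fruits_eaten) := by unfold Pre_nfruits; infer_instance

def pvWitness_nfruits : (List (String × Int)) × String := ([("apple", 3), ("b", 2)], "bx")

def Spec_nfruits (dict : List (String × Int)) (fruits_eaten : String) (out : Int) : Prop := out = nfruits_alt dict fruits_eaten
instance (dict : List (String × Int)) (fruits_eaten : String) (out : Int) : Decidable (Spec_nfruits dict fruits_eaten out) := by unfold Spec_nfruits; infer_instance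

-- ===== CLAIM (what is proved, stated in full; the proofs are below) =====
def Claim_equal_nfruits : Prop := ∀ (dict : List (String × Int)) (fruits_eaten : String), Dom_nfruits dict fruits_eaten → Pre_nfruits dict fruits_eaten → Spec_nfruits dict fruits_eaten (nfruits dict fruits_eaten)

-- ===== LEMMAS AND PROOFS =====

-- A's outer loop in closed form: after sweeping the dict once per eaten character,
-- an entry's value has gained (#characters) − 2·(#characters equal to its key).
lemma loopA_closed (cs : List Char) (d : List (String × Int)) :
    cs.foldl (fun d item => d.map (fun p =>
        if p.1 = String.mk [item] then (p.1, p.2 - 1) else (p.1, p.2 + 1))) d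
    = d.map (fun p => (p.1, p.2 + (cs.length : Int)
        - 2 * (cs.countP (fun ch => String.mk [ch] == p.1) : Int))) := by
  induction cs generalizing d with
  | nil => simp
  | cons c cs ih =>
    simp only [List.foldl_cons, ih, List.map_map]
    apply List.map_congr_left
    intro p _
    by_cases h : p.1 = String.mk [c]
    · simp only [Function.comp, h, List.countP_cons, List.length_cons,
        beq_self_eq_true, if_true]
      push_cast; ring_nf
    · simp only [Function.comp, if_neg h, List.countP_cons, List.length_cons, beq_iff_eq]
      rw [if_neg (fun hh => h hh.symm)]
      push_cast; ring_nf

-- B's counter lookup is the character count of the key.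
lemma counts_getD (cs : List Char) (s : String) :
    (cs.foldl (fun c ch =>
        c.insert (String.mk [ch]) (c.getD (String.mk [ch]) 0 + 1)) PySem.Dict.empty).getD s 0
    = (cs.countP (fun ch => String.mk [ch] == s) : Int) := by
  have h := (List.foldl_map (f := fun ch => String.mk [ch])
      (g := fun (c : PySem.Dict String Int) x => c.insert x (c.getD x 0 + 1))
      (l := cs) (init := PySem.Dict.empty)).symm
  simp only [h, PySem.Dict.foldl_insert_getD_add_one_eq_counter, PySem.Dict.getD_counter,
    List.count_eq_countP, List.countP_map]
  rfl

-- ===== VERDICT (by name: the statement is the Claim_ definition above) =====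
theorem nfruits_spec : Claim_equal_nfruits := by
  intro dict fruits_eaten _ _
  unfold Spec_nfruits nfruits nfruits_alt
  cases h : PySem.Str.pyGet? fruits_eaten (-1) with
  | none => rfl
  | some item =>
    simp only [loopA_closed, List.foldl_map, counts_getD]
    congr 1
    funext m p
    by_cases hp : p.1 = String.mk [item]
    · simp only [hp, if_pos trivial]
    · simp only [if_neg hp]; ring_nf
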